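-- pv_equiv track=rewrite | github.com/Young19ermi/Competitive_programming | A_Spris.py | solve
-- ===== SOURCE A (Python) =====
-- def solve(n,m,k):
--     res = 0
--     mango,avo,ban = 0,0,0
--     while n >= 1 and m >= 2 and k >= 4:
--         if n >= 1:
--             mango += 1
--             n -=1
--         if m >= 2:
--             avo += 1
--             m-=2
--         if k >= 4:
--             ban += 1
--             k-=4
--     return mango + 2 * avo + 4 * ban
-- ===== SOURCE B (Python) =====
-- def solve(n, m, k):
--     # closed form: the loop runs t = max(0, min(n, m//2, k//4)) times,
--     # contributing 1 + 2 + 4 = 7 per iteration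
--     return 7 * max(0, min(n, m // 2, k // 4))
-- ===== Notes on version B (the rewrite author's own statement) =====
-- stated objective: faster
-- what changed: replaced the decrement-while loop with the closed form 7*max(0, min(n, m//2, k//4))
import Mathlib
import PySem

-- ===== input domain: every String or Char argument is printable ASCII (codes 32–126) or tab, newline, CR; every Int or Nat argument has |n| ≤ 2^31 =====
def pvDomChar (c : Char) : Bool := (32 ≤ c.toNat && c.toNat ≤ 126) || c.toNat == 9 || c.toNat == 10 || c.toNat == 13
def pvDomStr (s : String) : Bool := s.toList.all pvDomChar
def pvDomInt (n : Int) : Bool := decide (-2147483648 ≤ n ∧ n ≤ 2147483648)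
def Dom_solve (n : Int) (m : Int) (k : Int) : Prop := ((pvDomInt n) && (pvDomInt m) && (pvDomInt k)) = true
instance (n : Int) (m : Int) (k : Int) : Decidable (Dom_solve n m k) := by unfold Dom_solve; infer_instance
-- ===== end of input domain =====

-- ===== PORT A =====
-- B replaces A's decrement-while loop by the closed form 7*max(0, min(n, m//2, k//4)) (objective: faster).
-- the while loop of A, carried as structural recursion on the same state
def solveLoop (n m k mango avo ban : Int) : Int :=
  if h : 1 ≤ n ∧ 2 ≤ m ∧ 4 ≤ k then
    solveLoop (n - 1) (m - 2) (k - 4) (mango + 1) (avo + 1) (ban + 1)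
  else
    mango + 2 * avo + 4 * ban
termination_by n.toNat
decreasing_by omega

def solve (n : Int) (m : Int) (k : Int) : Int := solveLoop n m k 0 0 0

-- ===== PORT B =====
def solve_alt (n : Int) (m : Int) (k : Int) : Int :=
  7 * max 0 (min n (min (PySem.Int.floordiv m 2) (PySem.Int.floordiv k 4)))

-- ===== PRECONDITION & SPEC =====
def Spec_solve (n : Int) (m : Int) (k : Int) (out : Int) : Prop := out = solve_alt n m k
instance (n : Int) (m : Int) (k : Int) (out : Int) : Decidable (Spec_solve n m k out) := by unfold Spec_solve; infer_instance

-- ===== CLAIM (what is proved, stated in full; the proofs are below) =====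
def Claim_equal_solve : Prop := ∀ (n : Int) (m : Int) (k : Int), Dom_solve n m k → Spec_solve n m k (solve n m k)

-- ===== LEMMAS AND PROOFS =====
theorem solveLoop_closed (n m k mango avo ban : Int) :
    solveLoop n m k mango avo ban
      = mango + 2 * avo + 4 * ban + 7 * max 0 (min n (min (m / 2) (k / 4))) := by
  fun_induction solveLoop n m k mango avo ban with
  | case1 n m k mango avo ban h ih =>
      rw [ih]; omega
  | case2 n m k mango avo ban h =>
      omega

-- ===== VERDICT (by name: the statement is the Claim_ definition above) =====
theorem solve_spec : Claim_equal_solve := by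
  intro n m k _
  unfold Spec_solve solve solve_alt
  rw [solveLoop_closed,
    PySem.Int.floordiv_eq_ediv_of_pos (a := m) (by norm_num),
    PySem.Int.floordiv_eq_ediv_of_pos (a := k) (by norm_num)]
  ring
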